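-- pv_equiv track=rewrite | github.com/Mavhawk64/Assorted-Codes | picross-stuff/list_checker.py | form_blocks
-- ===== SOURCE A (Python) =====
-- def form_blocks(arr):
--     # converts [1,1,0,1,0] to [2,0,1,0]
--     blocks = []
--     for i in arr:
--         if i == 1:
--             if len(blocks) == 0 or blocks[-1] == 0:
--                 blocks.append(1)
--             else:
--                 blocks[-1] += 1
--         else:
--             blocks.append(0)
--     return blocks
-- ===== SOURCE B (Python) =====
-- def form_blocks(arr):
--     # converts [1,1,0,1,0] to [2,0,1,0]
--     # run-scanning: find each maximal run, emit per run
--     blocks = []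
--     i = 0
--     while i < len(arr):
--         j = i + 1
--         if arr[i] == 1:
--             while j < len(arr) and arr[j] == 1:
--                 j += 1
--             blocks.append(j - i)
--         else:
--             while j < len(arr) and arr[j] != 1:
--                 j += 1
--             blocks.extend([0] * (j - i))
--         i = j
--     return blocks
-- ===== Notes on version B (the rewrite author's own statement) =====
-- stated objective: alternative
-- what changed: B scans maximal runs with a two-pointer sweep and emits one count (or a block of zeros) per run, instead of A's element-wise update of the last block.
import Mathlib
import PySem

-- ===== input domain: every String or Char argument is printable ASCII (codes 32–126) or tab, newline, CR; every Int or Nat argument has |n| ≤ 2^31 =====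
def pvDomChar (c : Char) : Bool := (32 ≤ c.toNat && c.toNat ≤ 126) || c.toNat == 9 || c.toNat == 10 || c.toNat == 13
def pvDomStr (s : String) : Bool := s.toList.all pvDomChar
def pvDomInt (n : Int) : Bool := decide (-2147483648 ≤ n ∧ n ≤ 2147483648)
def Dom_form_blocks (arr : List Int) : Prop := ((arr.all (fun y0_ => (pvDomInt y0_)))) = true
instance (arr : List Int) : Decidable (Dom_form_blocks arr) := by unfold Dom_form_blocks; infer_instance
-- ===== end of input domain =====

-- B replaces A's element-wise last-block update by a two-pointer run scan emitting one count per run (alternative decomposition, same cost).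


-- ===== PORT A =====
-- one step of A's loop body: update the block list for element i
def aStep (blocks : List Int) (i : Int) : List Int :=
  if i = 1 then
    match blocks.getLast? with
    | none => blocks ++ [1]                 -- len(blocks) == 0 → append 1
    | some last =>
      if last = 0 then blocks ++ [1]        -- blocks[-1] == 0 → append 1
      else blocks.dropLast ++ [last + 1]    -- blocks[-1] += 1
  else blocks ++ [0]                        -- append 0

def form_blocks (arr : List Int) : List Int := arr.foldl aStep []

-- ===== PORT B =====
-- Source B: two-pointer run scan; each iteration consumes one maximal run (the inner
-- whiles = takeWhile/dropWhile on the tail) and emits its count or a block of zeros.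
def form_blocks_alt (arr : List Int) : List Int :=
  match arr with
  | [] => []
  | x :: xs =>
    if x = 1 then
      ((1 : Int) + (xs.takeWhile (fun y => y = 1)).length) ::
        form_blocks_alt (xs.dropWhile (fun y => y = 1))
    else
      List.replicate (1 + (xs.takeWhile (fun y => ¬ y = 1)).length) (0 : Int) ++
        form_blocks_alt (xs.dropWhile (fun y => ¬ y = 1))
termination_by arr.length
decreasing_by
  · exact Nat.lt_succ_of_le (xs.length_dropWhile_le _)
  · exact Nat.lt_succ_of_le (xs.length_dropWhile_le _)

-- ===== PRECONDITION & SPEC =====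
def Spec_form_blocks (arr : List Int) (out : List Int) : Prop := out = form_blocks_alt arr
instance (arr : List Int) (out : List Int) : Decidable (Spec_form_blocks arr out) := by unfold Spec_form_blocks; infer_instance

-- ===== CLAIM (what is proved, stated in full; the proofs are below) =====
def Claim_equal_form_blocks : Prop := ∀ (arr : List Int), Dom_form_blocks arr → Spec_form_blocks arr (form_blocks arr)

-- ===== LEMMAS AND PROOFS =====

-- A's step on a good (empty or 0-ending) block list and a 1 appends a fresh 1.
theorem aStep_one_good (blocks : List Int)
    (h : blocks = [] ∨ blocks.getLast? = some 0) :
    aStep blocks 1 = blocks ++ [1] := by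
  rcases h with h | h
  · simp [aStep, h]
  · simp [aStep, h]

-- A's fold over a run of 1s just increments the last (positive) block.
theorem foldl_ones (run : List Int) : ∀ (B : List Int) (c : Int), (∀ y ∈ run, y = 1) → 1 ≤ c →
    run.foldl aStep (B ++ [c]) = B ++ [c + run.length] := by
  induction run with
  | nil => intro B c _ _; simp
  | cons y ys ih =>
    intro B c hall hc
    have hy : y = 1 := hall y (by simp)
    have hstep : aStep (B ++ [c]) y = B ++ [c + 1] := by
      subst hy
      simp [aStep]
      intro h0; omega
    rw [List.foldl_cons, hstep, ih B (c + 1) (fun z hz => hall z (by simp [hz])) (by omega)]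
    congr 1
    simp
    ring

-- A's fold over a run of non-1s appends one 0 per element.
theorem foldl_zeros (run : List Int) : ∀ (blocks : List Int), (∀ y ∈ run, y ≠ 1) →
    run.foldl aStep blocks = blocks ++ List.replicate run.length 0 := by
  induction run with
  | nil => intro blocks _; simp
  | cons y ys ih =>
    intro blocks hall
    have hy : y ≠ 1 := hall y (by simp)
    rw [List.foldl_cons, show aStep blocks y = blocks ++ [0] by simp [aStep, hy],
        ih _ (fun z hz => hall z (by simp [hz]))]
    simp [List.replicate_succ]

-- head of dropWhile does not satisfy the predicate
theorem head_dropWhile_false {p : Int → Bool} {xs : List Int} {h : Int}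
    (hh : (xs.dropWhile p).head? = some h) : p h = false := by
  induction xs with
  | nil => simp [List.dropWhile] at hh
  | cons a as ih =>
    by_cases hp : p a
    · exact ih (by simpa [List.dropWhile, hp] using hh)
    · simp [List.dropWhile, hp] at hh
      simpa [← hh] using hp

-- main invariant: A's fold from any block list that is empty / 0-ending whenever
-- the next element is a 1 equals that list followed by B's output.
theorem main_lemma : ∀ (n : ℕ) (arr blocks : List Int), arr.length ≤ n →
    (arr.head? = some 1 → blocks = [] ∨ blocks.getLast? = some 0) →
    arr.foldl aStep blocks = blocks ++ form_blocks_alt arr := by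
  intro n
  induction n with
  | zero =>
    intro arr blocks hlen _
    have : arr = [] := List.eq_nil_of_length_eq_zero (Nat.le_zero.mp hlen)
    subst this; simp [form_blocks_alt]
  | succ n ih =>
    intro arr blocks hlen hinv
    match arr with
    | [] => simp [form_blocks_alt]
    | x :: xs =>
      by_cases hx : x = 1
      · subst hx
        have hgood := hinv rfl
        set run := xs.takeWhile (fun y => y = 1) with hrun
        set rest := xs.dropWhile (fun y => y = 1) with hrest
        have hsplit : xs = run ++ rest := (xs.takeWhile_append_dropWhile ..).symm
        have hall : ∀ y ∈ run, y = 1 := by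
          intro y hy
          have := List.mem_takeWhile_imp hy
          simpa using this
        have hrestlen : rest.length ≤ n := by
          rw [hrest]
          have h1 := xs.length_dropWhile_le (fun y => decide (y = 1))
          simp at hlen; omega
        have hrestinv : rest.head? = some 1 → (blocks ++ [(1 : Int) + run.length] = [] ∨ (blocks ++ [(1 : Int) + run.length]).getLast? = some 0) := by
          intro hh
          exfalso
          have := head_dropWhile_false (p := fun y => decide (y = 1)) (xs := xs) (h := 1)
          simp at this ⊢
          apply this
          simpa [hrest, List.dropWhile] using hh
        calc (1 :: xs).foldl aStep blocks
            = xs.foldl aStep (blocks ++ [1]) := by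
              rw [List.foldl_cons, aStep_one_good blocks hgood]
          _ = rest.foldl aStep ((blocks ++ [1 + (run.length : Int)])) := by
              rw [hsplit, List.foldl_append, foldl_ones run blocks 1 hall le_rfl]
          _ = blocks ++ [1 + (run.length : Int)] ++ form_blocks_alt rest :=
              ih rest _ hrestlen hrestinv
          _ = blocks ++ form_blocks_alt (1 :: xs) := by
              rw [show form_blocks_alt (1 :: xs) = ((1 : Int) + run.length) :: form_blocks_alt rest by
                simp [form_blocks_alt, hrun, hrest]]
              simp
      · set run := xs.takeWhile (fun y => ¬ y = 1) with hrun
        set rest := xs.dropWhile (fun y => ¬ y = 1) with hrest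
        have hsplit : xs = run ++ rest := (xs.takeWhile_append_dropWhile ..).symm
        have hall : ∀ y ∈ run, y ≠ 1 := by
          intro y hy
          have := List.mem_takeWhile_imp hy
          simpa using this
        have hrestlen : rest.length ≤ n := by
          rw [hrest]
          have h1 := xs.length_dropWhile_le (fun y => decide (¬ y = 1))
          simp at hlen; omega
        have hrestinv : rest.head? = some 1 →
            (blocks ++ List.replicate (1 + run.length) (0 : Int) = [] ∨
             (blocks ++ List.replicate (1 + run.length) (0 : Int)).getLast? = some 0) := by
          intro _
          right
          rw [Nat.add_comm, List.replicate_succ', ← List.append_assoc]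
          simp
        calc (x :: xs).foldl aStep blocks
            = xs.foldl aStep (blocks ++ [0]) := by
              rw [List.foldl_cons, show aStep blocks x = blocks ++ [0] by simp [aStep, hx]]
          _ = rest.foldl aStep (blocks ++ List.replicate (1 + run.length) (0 : Int)) := by
              rw [hsplit, List.foldl_append, foldl_zeros run _ hall]
              congr 1
              rw [Nat.add_comm, List.replicate_succ]
              simp
          _ = blocks ++ List.replicate (1 + run.length) (0 : Int) ++ form_blocks_alt rest :=
              ih rest _ hrestlen hrestinv
          _ = blocks ++ form_blocks_alt (x :: xs) := by
              rw [show form_blocks_alt (x :: xs) = List.replicate (1 + run.length) (0 : Int) ++ form_blocks_alt rest by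
                simp [form_blocks_alt, hx, hrun, hrest]]
              simp

-- ===== VERDICT (by name: the statement is the Claim_ definition above) =====
theorem form_blocks_spec : Claim_equal_form_blocks := by
  intro arr _
  unfold Spec_form_blocks form_blocks
  simpa using main_lemma arr.length arr [] le_rfl (fun _ => Or.inl rfl)
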